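-- pv_equiv track=rewrite | github.com/boringbyte/leetcode | LC/Meta/Revision1/Problems-151-165.py | stickers_to_spell_words
-- ===== SOURCE A (Python) =====
-- import collections
--
-- def stickers_to_spell_words(stickers, target):
--     # TODO: This might be wrong
--     count, result, n, memo = collections.Counter(target), [float('inf')], len(target), collections.defaultdict(int)
--
--     def dfs(sofar, i):
--         if i == n:
--             result[0] = sofar
--         elif memo[target[i]] >= count[target[i]]:
--             dfs(sofar, i + 1)
--         elif sofar + 1 < result[0]:
--             for sticker in stickers:
--                 if target[i] in sticker:
--                     for s in sticker:
--                         memo[s] += 1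
--                     dfs(sofar + 1, i + 1)
--                     for s in sticker:
--                         memo[s] -= 1
--     dfs(0, 0)
--     return result[0] if result[0] < float('inf') else -1
-- ===== SOURCE B (Python) =====
-- def stickers_to_spell_words(stickers, target):
--     # Top-down DP memoized on (position, remaining-needs vector) instead of
--     # A's mutable branch-and-bound DFS.
--     chars = sorted(set(target))
--     n = len(target)
--     need0 = {}
--     for c in chars:
--         need0[c] = target.count(c)
--     cache = {}
--
--     def best(i, need):
--         if i == n:
--             return 0
--         key = (i, tuple(need[c] for c in chars))
--         if key in cache:
--             return cache[key]
--         c = target[i]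
--         if need[c] == 0:
--             res = best(i + 1, need)
--         else:
--             res = None
--             for st in stickers:
--                 if c in st:
--                     need2 = dict(need)
--                     for ch in st:
--                         if need2.get(ch, 0) > 0:
--                             need2[ch] = need2[ch] - 1
--                     sub = best(i + 1, need2)
--                     if sub is not None and (res is None or 1 + sub < res):
--                         res = 1 + sub
--         cache[key] = res
--         return res
--
--     r = best(0, need0)
--     return -1 if r is None else r
-- ===== Notes on version B (the rewrite author's own statement) =====
-- stated objective: alternative
-- what changed: A is an exponential branch-and-bound DFS with a shared mutable best-result and an increment/undo character counter; B is a pure top-down dynamic program that tracks the remaining needed count per target character and memoizes subproblems keyed by (position, remaining-needs vector), so identical search states are solved once.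
import Mathlib
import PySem

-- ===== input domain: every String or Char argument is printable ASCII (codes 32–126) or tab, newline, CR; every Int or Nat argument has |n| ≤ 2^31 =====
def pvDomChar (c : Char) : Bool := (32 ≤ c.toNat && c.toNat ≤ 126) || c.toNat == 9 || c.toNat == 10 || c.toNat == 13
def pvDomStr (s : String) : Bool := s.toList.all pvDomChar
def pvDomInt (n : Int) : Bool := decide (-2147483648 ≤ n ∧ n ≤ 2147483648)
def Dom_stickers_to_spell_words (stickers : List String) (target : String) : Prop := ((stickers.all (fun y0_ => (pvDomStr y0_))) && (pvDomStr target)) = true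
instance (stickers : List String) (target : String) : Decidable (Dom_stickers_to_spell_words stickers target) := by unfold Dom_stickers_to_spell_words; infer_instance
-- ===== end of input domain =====

-- B replaces A's mutable branch-and-bound DFS by a memoized dynamic program over
-- (position, remaining-needs vector) states; same return value, proved equal on all inputs.

-- ===== PORT A =====
-- 'for s in sticker: memo[s] += 1' (defaultdict(int)); the matching '-= 1' undo loop is
-- rendered by passing the incremented dict by value, which restores memo exactly as Python does.
def pvAddChars (memo : PySem.Dict Char Int) (st : List Char) : PySem.Dict Char Int :=
  st.foldl (fun m s => m.modify s 0 (· + 1)) memo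

-- sofar + 1 < result[0]: result[0] is float('inf') (= none) until first assigned
def pvLtInf (a : Int) (r : Option Int) : Bool :=
  match r with
  | none => true
  | some v => a < v

-- dfs(sofar, i): ported on the suffix target[i:]; the mutable result[0] (float('inf') = none)
-- is threaded through and returned; memo mutations are net-zero across each sticker branch.
def pvDfsA (stickers : List (List Char)) (count : PySem.Dict Char Int) :
    List Char → Int → PySem.Dict Char Int → Option Int → Option Int
  | [], sofar, _memo, _result => some sofar            -- i == n: result[0] = sofar
  | c :: rest, sofar, memo, result =>
    if memo.getD c 0 ≥ count.getD c 0 then             -- memo[target[i]] >= count[target[i]]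
      pvDfsA stickers count rest sofar memo result
    else if pvLtInf (sofar + 1) result then                                      -- sofar+1 < result[0]
      stickers.foldl (fun res st =>
        if c ∈ st then                                  -- target[i] in sticker (single char: membership)
          pvDfsA stickers count rest (sofar + 1) (pvAddChars memo st) res
        else res) result
    else result
  termination_by rest => rest.length

def stickers_to_spell_words (stickers : List String) (target : String) : Int :=
  let tl := target.toList
  let count := PySem.Dict.counter tl                    -- collections.Counter(target)
  match pvDfsA (stickers.map String.toList) count tl 0 PySem.Dict.empty none with
  | some r => r
  | none => -1                                          -- result[0] < inf else -1

-- ===== PORT B =====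
-- for ch in st: if need2.get(ch, 0) > 0: need2[ch] = need2[ch] - 1
def pvSubChars (need : PySem.Dict Char Int) (st : List Char) : PySem.Dict Char Int :=
  st.foldl (fun m ch => if m.getD ch 0 > 0 then m.insert ch (m.getD ch 0 - 1) else m) need

-- best(i, need), on the suffix target[i:]; the cache dict is threaded through.
def pvBestB (stickers : List (List Char)) (chars : List Char) :
    Int → List Char → PySem.Dict Char Int → PySem.Dict (Int × List Int) (Option Int) →
    Option Int × PySem.Dict (Int × List Int) (Option Int)
  | _i, [], _need, cache => (some 0, cache)            -- i == n: return 0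
  | i, c :: rest, need, cache =>
    let key : Int × List Int := (i, chars.map (fun ch => need.getD ch 0))  -- (i, tuple(need[c] for c in chars))
    match cache.get? key with
    | some v => (v, cache)                              -- if key in cache: return cache[key]
    | none =>
      let p :=
        if need.getD c 0 = 0 then pvBestB stickers chars (i + 1) rest need cache
        else
          stickers.foldl (fun (acc : Option Int × PySem.Dict (Int × List Int) (Option Int)) st =>
            if c ∈ st then
              let q := pvBestB stickers chars (i + 1) rest (pvSubChars need st) acc.2
              match q.1, acc.1 with                     -- if sub is not None and (res is None or 1+sub < res)
              | none, r => (r, q.2)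
              | some s, none => (some (1 + s), q.2)
              | some s, some r => ((if 1 + s < r then some (1 + s) else some r), q.2)
            else acc) (none, cache)
      (p.1, p.2.insert key p.1)                         -- cache[key] = res
  termination_by _ rest => rest.length

def stickers_to_spell_words_alt (stickers : List String) (target : String) : Int :=
  let tl := target.toList
  let chars := PySem.List.sorted (PySem.Set.ofList tl) (fun x => x) false   -- sorted(set(target))
  let need0 := chars.foldl (fun m c => m.insert c ((tl.count c : Int))) PySem.Dict.empty  -- need0[c] = target.count(c)
  match (pvBestB (stickers.map String.toList) chars 0 tl need0 PySem.Dict.empty).1 with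
  | some r => r
  | none => -1                                          -- return -1 if r is None else r

-- ===== PRECONDITION & SPEC =====
def Spec_stickers_to_spell_words (stickers : List String) (target : String) (out : Int) : Prop := out = stickers_to_spell_words_alt stickers target
instance (stickers : List String) (target : String) (out : Int) : Decidable (Spec_stickers_to_spell_words stickers target out) := by unfold Spec_stickers_to_spell_words; infer_instance

-- ===== CLAIM (what is proved, stated in full; the proofs are below) =====
def Claim_equal_stickers_to_spell_words : Prop := ∀ (stickers : List String) (target : String), Dom_stickers_to_spell_words stickers target → Spec_stickers_to_spell_words stickers target (stickers_to_spell_words stickers target)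

-- ===== LEMMAS AND PROOFS =====

-- min on Option Int with none = +infinity
def pvOmin (a b : Option Int) : Option Int :=
  match a, b with
  | none, b => b
  | a, none => a
  | some x, some y => some (min x y)

-- pure abstraction of A's dfs: additional stickers needed from state (suffix, memo); none = impossible
def pvGA (stickers : List (List Char)) (count : PySem.Dict Char Int) :
    List Char → PySem.Dict Char Int → Option Int
  | [], _ => some 0
  | c :: rest, memo =>
    if memo.getD c 0 ≥ count.getD c 0 then pvGA stickers count rest memo
    else stickers.foldl (fun acc st =>
      if c ∈ st then pvOmin acc (Option.map (1 + ·) (pvGA stickers count rest (pvAddChars memo st)))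
      else acc) none
  termination_by rest => rest.length

-- pure (cache-free) version of B's best
def pvBestPure (stickers : List (List Char)) : List Char → PySem.Dict Char Int → Option Int
  | [], _ => some 0
  | c :: rest, need =>
    if need.getD c 0 = 0 then pvBestPure stickers rest need
    else stickers.foldl (fun acc st =>
      if c ∈ st then
        match pvBestPure stickers rest (pvSubChars need st), acc with
        | none, r => r
        | some s, none => some (1 + s)
        | some s, some r => if 1 + s < r then some (1 + s) else some r
      else acc) none
  termination_by rest => rest.length

theorem pvOmin_bound {b : Int} {a x : Option Int}
    (ha : ∀ r, a = some r → b ≤ r) (hx : ∀ r, x = some r → b ≤ r) :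
    ∀ r, pvOmin a x = some r → b ≤ r := by
  intro r h
  rcases a with _ | av
  · exact hx r h
  · rcases x with _ | xv
    · exact ha r h
    · have h1 := ha av rfl
      have h2 := hx xv rfl
      simp only [pvOmin, Option.some.injEq] at h
      subst h
      exact le_min h1 h2

theorem pvFoldMin_bound (c : Char) (b : Int) (f : List Char → Option Int)
    (hf : ∀ st r, f st = some r → b ≤ r) :
    ∀ (sts : List (List Char)) (acc : Option Int), (∀ r, acc = some r → b ≤ r) →
      ∀ r, sts.foldl (fun acc st => if c ∈ st then pvOmin acc (f st) else acc) acc = some r → b ≤ r := by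
  intro sts
  induction sts with
  | nil => intro acc hacc r h; exact hacc r h
  | cons st sts ih =>
    intro acc hacc r h
    simp only [List.foldl_cons] at h
    by_cases hc : c ∈ st
    · rw [if_pos hc] at h
      exact ih _ (pvOmin_bound hacc (hf st)) r h
    · rw [if_neg hc] at h
      exact ih _ hacc r h

theorem pvGA_nonneg (stickers : List (List Char)) (count : PySem.Dict Char Int)
    (rest : List Char) :
    ∀ (memo : PySem.Dict Char Int) (v : Int),
      pvGA stickers count rest memo = some v → 0 ≤ v := by
  induction rest with
  | nil =>
    intro memo v h
    simp only [pvGA, Option.some.injEq] at h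
    omega
  | cons c rest ih =>
    intro memo v h
    simp only [pvGA] at h
    by_cases hcov : memo.getD c 0 ≥ count.getD c 0
    · rw [if_pos hcov] at h
      exact ih memo v h
    · rw [if_neg hcov] at h
      refine pvFoldMin_bound c 0 _ ?_ stickers none (by intro r hr; cases hr) v h
      intro st r hr
      obtain ⟨w, hw, rfl⟩ := Option.map_eq_some_iff.mp hr
      have := ih _ w hw
      omega

theorem pvGA_pos_uncovered (stickers : List (List Char)) (count : PySem.Dict Char Int)
    (c : Char) (rest : List Char) (memo : PySem.Dict Char Int) (v : Int)
    (hnc : ¬ memo.getD c 0 ≥ count.getD c 0)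
    (h : pvGA stickers count (c :: rest) memo = some v) : 1 ≤ v := by
  simp only [pvGA] at h
  rw [if_neg hnc] at h
  refine pvFoldMin_bound c 1 _ ?_ stickers none (by intro r hr; cases hr) v h
  intro st r hr
  obtain ⟨w, hw, rfl⟩ := Option.map_eq_some_iff.mp hr
  have := pvGA_nonneg stickers count rest _ w hw
  omega

-- one fold step of A's sticker loop against the pure min-fold
theorem pvFoldA_eq (c : Char) (sofar : Int) (result : Option Int)
    (F : List Char → Option Int → Option Int) (G : List Char → Option Int)
    (hFG : ∀ st res, (∀ r, res = some r → sofar + 1 ≤ r) →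
        F st res = pvOmin res (Option.map (fun x => sofar + 1 + x) (G st)))
    (hG : ∀ st v, G st = some v → 0 ≤ v) :
    ∀ (sts : List (List Char)) (accA accG : Option Int),
      accA = pvOmin result (Option.map (fun x => sofar + x) accG) →
      (∀ r, accA = some r → sofar + 1 ≤ r) →
      sts.foldl (fun res st => if c ∈ st then F st res else res) accA
        = pvOmin result (Option.map (fun x => sofar + x)
            (sts.foldl (fun acc st =>
              if c ∈ st then pvOmin acc (Option.map (fun x => 1 + x) (G st)) else acc) accG)) := by
  intro sts
  induction sts with
  | nil => intro accA accG hrel _; simpa using hrel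
  | cons st sts ih =>
    intro accA accG hrel hbnd
    simp only [List.foldl_cons]
    by_cases hc : c ∈ st
    · rw [if_pos hc, if_pos hc]
      have hstep : F st accA
          = pvOmin accA (Option.map (fun x => sofar + 1 + x) (G st)) := hFG st accA hbnd
      refine ih _ _ ?_ ?_
      · rw [hstep, hrel]
        rcases accG with _ | g1 <;> rcases hg : G st with _ | g2 <;> rcases result with _ | r <;>
          simp [pvOmin, Int.min_def] <;> omega
      · intro r hr
        rw [hstep] at hr
        refine pvOmin_bound hbnd (fun r' hr' => ?_) r hr
        obtain ⟨w, hw, rfl⟩ := Option.map_eq_some_iff.mp hr'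
        have := hG st w hw
        omega
    · rw [if_neg hc, if_neg hc]
      exact ih _ _ hrel hbnd

-- branch-and-bound elimination: the threaded result is the min of the incoming bound and sofar + pure value
theorem pvDfsA_eq (stickers : List (List Char)) (count : PySem.Dict Char Int)
    (rest : List Char) :
    ∀ (sofar : Int) (memo : PySem.Dict Char Int) (result : Option Int),
      (∀ r, result = some r → sofar ≤ r) →
      pvDfsA stickers count rest sofar memo result
        = pvOmin result (Option.map (fun x => sofar + x) (pvGA stickers count rest memo)) := by
  induction rest with
  | nil =>
    intro sofar memo result hbnd
    simp only [pvDfsA, pvGA, Option.map_some]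
    rcases result with _ | r
    · simp [pvOmin]
    · have := hbnd r rfl
      simp only [pvOmin, Option.some.injEq, Int.min_def]
      split_ifs <;> omega
  | cons c rest ih =>
    intro sofar memo result hbnd
    simp only [pvDfsA]
    by_cases hcov : memo.getD c 0 ≥ count.getD c 0
    · rw [if_pos hcov]
      have hg : pvGA stickers count (c :: rest) memo = pvGA stickers count rest memo := by
        simp only [pvGA]; rw [if_pos hcov]
      rw [hg]
      exact ih sofar memo result hbnd
    · rw [if_neg hcov]
      rcases result with _ | r
    -- result = None: the bound test passes
      · rw [if_pos (show pvLtInf (sofar + 1) none = true from rfl)]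
        have hg : pvGA stickers count (c :: rest) memo
            = stickers.foldl (fun acc st =>
                if c ∈ st then pvOmin acc (Option.map (fun x => 1 + x)
                  (pvGA stickers count rest (pvAddChars memo st))) else acc) none := by
          simp only [pvGA]; rw [if_neg hcov]
        rw [hg]
        exact pvFoldA_eq c sofar none _ _
          (fun st res hb => ih (sofar + 1) (pvAddChars memo st) res hb)
          (fun st v hv => pvGA_nonneg stickers count rest _ v hv)
          stickers none none rfl (by intro r hr; cases hr)
      · by_cases hlt : sofar + 1 < r
        · rw [if_pos (show pvLtInf (sofar + 1) (some r) = true by simp [pvLtInf, hlt])]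
          have hg : pvGA stickers count (c :: rest) memo
              = stickers.foldl (fun acc st =>
                  if c ∈ st then pvOmin acc (Option.map (fun x => 1 + x)
                    (pvGA stickers count rest (pvAddChars memo st))) else acc) none := by
            simp only [pvGA]; rw [if_neg hcov]
          rw [hg]
          refine pvFoldA_eq c sofar (some r) _ _
            (fun st res hb => ih (sofar + 1) (pvAddChars memo st) res hb)
            (fun st v hv => pvGA_nonneg stickers count rest _ v hv)
            stickers (some r) none rfl ?_
          intro r' hr'
          cases hr'
          omega
        · rw [if_neg (show ¬ pvLtInf (sofar + 1) (some r) = true by simp [pvLtInf, hlt])]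
          rcases hga : pvGA stickers count (c :: rest) memo with _ | v
          · simp [pvOmin]
          · have h1 := pvGA_pos_uncovered stickers count c rest memo v hcov hga
            have h2 := hbnd r rfl
            simp only [pvOmin, Option.map_some, Option.some.injEq, Int.min_def]
            split_ifs <;> omega

theorem pvAddChars_cons (memo : PySem.Dict Char Int) (ch : Char) (st : List Char) :
    pvAddChars memo (ch :: st) = pvAddChars (memo.modify ch 0 (· + 1)) st := rfl

theorem pvSubChars_cons (need : PySem.Dict Char Int) (ch : Char) (st : List Char) :
    pvSubChars need (ch :: st)
      = pvSubChars (if need.getD ch 0 > 0 then need.insert ch (need.getD ch 0 - 1) else need) st := rfl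

-- memo/need correspondence
def pvCorr (count memo need : PySem.Dict Char Int) : Prop :=
  ∀ ch, need.getD ch 0 = max (count.getD ch 0 - memo.getD ch 0) 0

theorem pvCorr_step (count memo need : PySem.Dict Char Int) (st : List Char)
    (h : pvCorr count memo need) : pvCorr count (pvAddChars memo st) (pvSubChars need st) := by
  induction st generalizing memo need with
  | nil => exact h
  | cons ch st ih =>
    rw [pvAddChars_cons, pvSubChars_cons]
    refine ih _ _ (fun x => ?_)
    have hx := h x
    have hc := h ch
    rw [PySem.Dict.getD_modify]
    by_cases hpos : need.getD ch 0 > 0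
    · rw [if_pos hpos, PySem.Dict.getD_insert]
      by_cases hxc : x = ch
      · rw [if_pos hxc, if_pos hxc]; subst hxc; omega
      · rw [if_neg hxc, if_neg hxc]; omega
    · rw [if_neg hpos]
      by_cases hxc : x = ch
      · rw [if_pos hxc]; subst hxc; omega
      · rw [if_neg hxc]; exact hx

theorem pvGA_eq_bestPure (stickers : List (List Char)) (count : PySem.Dict Char Int)
    (rest : List Char) :
    ∀ (memo need : PySem.Dict Char Int), pvCorr count memo need →
      pvGA stickers count rest memo = pvBestPure stickers rest need := by
  induction rest with
  | nil => intro memo need _; simp only [pvGA, pvBestPure]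
  | cons c rest ih =>
    intro memo need hcorr
    have hc := hcorr c
    simp only [pvGA, pvBestPure]
    by_cases hcov : memo.getD c 0 ≥ count.getD c 0
    · rw [if_pos hcov, if_pos (show need.getD c 0 = 0 by omega)]
      exact ih memo need hcorr
    · rw [if_neg hcov, if_neg (show ¬ need.getD c 0 = 0 by omega)]
      have hstep : (fun (acc : Option Int) (st : List Char) =>
          if c ∈ st then pvOmin acc (Option.map (fun x => 1 + x)
            (pvGA stickers count rest (pvAddChars memo st))) else acc)
          = (fun (acc : Option Int) (st : List Char) =>
            if c ∈ st then
              match pvBestPure stickers rest (pvSubChars need st), acc with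
              | none, r => r
              | some s, none => some (1 + s)
              | some s, some r => if 1 + s < r then some (1 + s) else some r
            else acc) := by
        funext acc st
        by_cases hcm : c ∈ st
        · rw [if_pos hcm, if_pos hcm, ih _ _ (pvCorr_step count memo need st hcorr)]
          rcases pvBestPure stickers rest (pvSubChars need st) with _ | v <;>
            rcases acc with _ | a <;>
            simp only [pvOmin, Option.map_some, Option.map_none, Int.min_def] <;>
            first
              | rfl
              | (split_ifs <;> first | rfl | exact congrArg some (by omega))
        · rw [if_neg hcm, if_neg hcm]
      rw [hstep]

-- pvBestPure only depends on need pointwise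
theorem pvSubChars_congr (need need' : PySem.Dict Char Int) (st : List Char)
    (h : ∀ ch, need.getD ch 0 = need'.getD ch 0) :
    ∀ ch, (pvSubChars need st).getD ch 0 = (pvSubChars need' st).getD ch 0 := by
  induction st generalizing need need' with
  | nil => exact h
  | cons ch st ih =>
    rw [pvSubChars_cons, pvSubChars_cons]
    refine ih _ _ (fun x => ?_)
    have hx := h x
    have hc := h ch
    by_cases hp : need.getD ch 0 > 0
    · rw [if_pos hp, if_pos (by omega : need'.getD ch 0 > 0),
        PySem.Dict.getD_insert, PySem.Dict.getD_insert]
      by_cases hxc : x = ch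
      · rw [if_pos hxc, if_pos hxc]; omega
      · rw [if_neg hxc, if_neg hxc]; exact hx
    · rw [if_neg hp, if_neg (by omega : ¬ need'.getD ch 0 > 0)]
      exact hx

theorem pvBestPure_ext (stickers : List (List Char)) (rest : List Char) :
    ∀ (need need' : PySem.Dict Char Int), (∀ ch, need.getD ch 0 = need'.getD ch 0) →
      pvBestPure stickers rest need = pvBestPure stickers rest need' := by
  induction rest with
  | nil => intro need need' _; simp only [pvBestPure]
  | cons c rest ih =>
    intro need need' h
    simp only [pvBestPure]
    have hc := h c
    have hstep : (fun (acc : Option Int) (st : List Char) =>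
        if c ∈ st then
          match pvBestPure stickers rest (pvSubChars need st), acc with
          | none, r => r
          | some s, none => some (1 + s)
          | some s, some r => if 1 + s < r then some (1 + s) else some r
        else acc)
        = (fun (acc : Option Int) (st : List Char) =>
          if c ∈ st then
            match pvBestPure stickers rest (pvSubChars need' st), acc with
            | none, r => r
            | some s, none => some (1 + s)
            | some s, some r => if 1 + s < r then some (1 + s) else some r
          else acc) := by
      funext acc st
      rw [ih (pvSubChars need st) (pvSubChars need' st) (pvSubChars_congr need need' st h)]
    rw [hc, hstep]
    by_cases h0 : need'.getD c 0 = 0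
    · rw [if_pos h0, if_pos h0]
      exact ih need need' h
    · rw [if_neg h0, if_neg h0]

-- need dicts reachable in B: zero outside chars
def pvGoodN (chars : List Char) (need : PySem.Dict Char Int) : Prop :=
  ∀ ch, ch ∉ chars → need.getD ch 0 = 0

theorem pvGoodN_sub (chars : List Char) (need : PySem.Dict Char Int) (st : List Char)
    (h : pvGoodN chars need) : pvGoodN chars (pvSubChars need st) := by
  induction st generalizing need with
  | nil => exact h
  | cons ch st ih =>
    rw [pvSubChars_cons]
    refine ih _ (fun x hx => ?_)
    by_cases hp : need.getD ch 0 > 0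
    · rw [if_pos hp, PySem.Dict.getD_insert]
      by_cases hxc : x = ch
      · rw [if_pos hxc]; subst hxc; have := h x hx; omega
      · rw [if_neg hxc]; exact h x hx
    · rw [if_neg hp]; exact h x hx

-- cache soundness
def pvCacheOK (stickers : List (List Char)) (chars tl : List Char)
    (cache : PySem.Dict (Int × List Int) (Option Int)) : Prop :=
  ∀ (i : Int) (vec : List Int) (v : Option Int), cache.get? (i, vec) = some v →
    ∀ need, pvGoodN chars need → chars.map (fun ch => need.getD ch 0) = vec →
      v = pvBestPure stickers (tl.drop i.toNat) need

theorem pvVec_pointwise (chars : List Char) (need need' : PySem.Dict Char Int)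
    (hg : pvGoodN chars need) (hg' : pvGoodN chars need')
    (hvec : chars.map (fun ch => need.getD ch 0) = chars.map (fun ch => need'.getD ch 0)) :
    ∀ ch, need.getD ch 0 = need'.getD ch 0 := by
  intro ch
  by_cases hm : ch ∈ chars
  · exact List.map_inj_left.mp hvec ch hm
  · rw [hg ch hm, hg' ch hm]

theorem pvCacheOK_insert (stickers : List (List Char)) (chars tl : List Char)
    (cache : PySem.Dict (Int × List Int) (Option Int)) (i : Int) (need : PySem.Dict Char Int)
    (p1 : Option Int)
    (hcache : pvCacheOK stickers chars tl cache)
    (hgood : pvGoodN chars need)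
    (hp1 : p1 = pvBestPure stickers (tl.drop i.toNat) need) :
    pvCacheOK stickers chars tl
      (cache.insert (i, chars.map (fun ch => need.getD ch 0)) p1) := by
  intro i' vec' v hget need' hg' hvec'
  rw [PySem.Dict.get?_insert] at hget
  split_ifs at hget with he
  · obtain ⟨hi, hvec⟩ := Prod.mk.injEq .. ▸ he
    cases hget
    subst hi
    rw [hp1]
    exact (pvBestPure_ext stickers _ need' need
      (pvVec_pointwise chars need' need hg' hgood (by rw [hvec', hvec]))).symm
  · exact hcache i' vec' v hget need' hg' hvec'

-- B's sticker loop threads the cache; sound caches stay sound and the value matches the pure fold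
theorem pvFoldB_ok (stickers : List (List Char)) (chars tl : List Char)
    (i : Int) (rest : List Char) (need : PySem.Dict Char Int) (c : Char)
    (IH : ∀ (need' : PySem.Dict Char Int) (cache : PySem.Dict (Int × List Int) (Option Int)),
        pvGoodN chars need' → pvCacheOK stickers chars tl cache →
        (pvBestB stickers chars (i + 1) rest need' cache).1 = pvBestPure stickers rest need' ∧
        pvCacheOK stickers chars tl (pvBestB stickers chars (i + 1) rest need' cache).2)
    (hgood : pvGoodN chars need) :
    ∀ (sts : List (List Char)) (a : Option Int)
      (cache : PySem.Dict (Int × List Int) (Option Int)),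
      pvCacheOK stickers chars tl cache →
      (sts.foldl (fun (acc : Option Int × PySem.Dict (Int × List Int) (Option Int)) st =>
          if c ∈ st then
            let q := pvBestB stickers chars (i + 1) rest (pvSubChars need st) acc.2
            match q.1, acc.1 with
            | none, r => (r, q.2)
            | some s, none => (some (1 + s), q.2)
            | some s, some r => ((if 1 + s < r then some (1 + s) else some r), q.2)
          else acc) (a, cache)).1
        = sts.foldl (fun (acc : Option Int) st =>
            if c ∈ st then
              match pvBestPure stickers rest (pvSubChars need st), acc with
              | none, r => r
              | some s, none => some (1 + s)
              | some s, some r => if 1 + s < r then some (1 + s) else some r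
            else acc) a ∧
      pvCacheOK stickers chars tl
        ((sts.foldl (fun (acc : Option Int × PySem.Dict (Int × List Int) (Option Int)) st =>
          if c ∈ st then
            let q := pvBestB stickers chars (i + 1) rest (pvSubChars need st) acc.2
            match q.1, acc.1 with
            | none, r => (r, q.2)
            | some s, none => (some (1 + s), q.2)
            | some s, some r => ((if 1 + s < r then some (1 + s) else some r), q.2)
          else acc) (a, cache)).2) := by
  intro sts
  induction sts with
  | nil => intro a cache hcache; exact ⟨rfl, hcache⟩
  | cons st sts ih2 =>
    intro a cache hcache
    simp only [List.foldl_cons]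
    by_cases hcm : c ∈ st
    · rw [if_pos hcm, if_pos hcm]
      obtain ⟨hq1, hq2⟩ := IH (pvSubChars need st) cache (pvGoodN_sub chars need st hgood) hcache
      show Prod.fst (sts.foldl _
          (match (pvBestB stickers chars (i + 1) rest (pvSubChars need st) cache).1, a with
          | none, r => (r, (pvBestB stickers chars (i + 1) rest (pvSubChars need st) cache).2)
          | some s, none => (some (1 + s), (pvBestB stickers chars (i + 1) rest (pvSubChars need st) cache).2)
          | some s, some r => ((if 1 + s < r then some (1 + s) else some r), (pvBestB stickers chars (i + 1) rest (pvSubChars need st) cache).2))) = _ ∧ _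
      rw [hq1]
      rcases pvBestPure stickers rest (pvSubChars need st) with _ | v <;> rcases a with _ | r
      · exact ih2 none _ hq2
      · exact ih2 (some r) _ hq2
      · exact ih2 (some (1 + v)) _ hq2
      · exact ih2 (if 1 + v < r then some (1 + v) else some r) _ hq2
    · rw [if_neg hcm, if_neg hcm]
      exact ih2 a cache hcache

theorem pvBestB_ok (stickers : List (List Char)) (chars tl : List Char) (rest : List Char) :
    ∀ (i : Int) (need : PySem.Dict Char Int) (cache : PySem.Dict (Int × List Int) (Option Int)),
      0 ≤ i → tl.drop i.toNat = rest → pvGoodN chars need → pvCacheOK stickers chars tl cache →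
      (pvBestB stickers chars i rest need cache).1 = pvBestPure stickers rest need ∧
      pvCacheOK stickers chars tl (pvBestB stickers chars i rest need cache).2 := by
  induction rest with
  | nil =>
    intro i need cache _ _ _ hcache
    exact ⟨by simp only [pvBestB, pvBestPure], by simpa only [pvBestB] using hcache⟩
  | cons c rest ih =>
    intro i need cache hi hdrop hgood hcache
    have hi1 : (0 : Int) ≤ i + 1 := by omega
    have hdrop1 : tl.drop (i + 1).toNat = rest := by
      rw [show (i + 1).toNat = i.toNat + 1 by omega, ← List.drop_drop, hdrop]
      rfl
    simp only [pvBestB]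
    cases hget : cache.get? (i, chars.map fun ch => need.getD ch 0) with
    | some v =>
      refine ⟨?_, hcache⟩
      have hv := hcache i _ v hget need hgood rfl
      rw [hdrop] at hv
      exact hv
    | none =>
      by_cases hc0 : need.getD c 0 = 0
      · rw [if_pos hc0]
        obtain ⟨h1, h2⟩ := ih (i + 1) need cache hi1 hdrop1 hgood hcache
        have hpure : pvBestPure stickers (c :: rest) need = pvBestPure stickers rest need := by
          simp only [pvBestPure]; rw [if_pos hc0]
        refine ⟨by rw [h1, hpure], ?_⟩
        exact pvCacheOK_insert stickers chars tl _ i need _ h2 hgood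
          (by rw [hdrop, hpure, h1])
      · rw [if_neg hc0]
        obtain ⟨h1, h2⟩ := pvFoldB_ok stickers chars tl i rest need c
          (fun need' cache' hg' hc' => ih (i + 1) need' cache' hi1 hdrop1 hg' hc')
          hgood stickers none cache hcache
        have hpure : pvBestPure stickers (c :: rest) need
            = stickers.foldl (fun (acc : Option Int) st =>
                if c ∈ st then
                  match pvBestPure stickers rest (pvSubChars need st), acc with
                  | none, r => r
                  | some s, none => some (1 + s)
                  | some s, some r => if 1 + s < r then some (1 + s) else some r
                else acc) none := by
          simp only [pvBestPure]; rw [if_neg hc0]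
        refine ⟨by rw [h1, hpure], ?_⟩
        exact pvCacheOK_insert stickers chars tl _ i need _ h2 hgood
          (by rw [hdrop, hpure, h1])

theorem pvNeed0_getD (tl : List Char) (chars : List Char) :
    ∀ (m0 : PySem.Dict Char Int) (x : Char),
    (chars.foldl (fun m c => m.insert c ((tl.count c : Int))) m0).getD x 0
      = if x ∈ chars then (tl.count x : Int) else m0.getD x 0 := by
  induction chars with
  | nil => intro m0 x; simp
  | cons ch chars ih =>
    intro m0 x
    simp only [List.foldl_cons]
    rw [ih]
    by_cases hm : x ∈ chars
    · rw [if_pos hm, if_pos (List.mem_cons_of_mem _ hm)]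
    · rw [if_neg hm, PySem.Dict.getD_insert]
      by_cases hx : x = ch
      · subst hx
        rw [if_pos rfl, if_pos (List.mem_cons_self ..)]
      · rw [if_neg hx, if_neg (by simp [List.mem_cons, hx, hm])]

-- ===== VERDICT (by name: the statement is the Claim_ definition above) =====
theorem stickers_to_spell_words_spec : Claim_equal_stickers_to_spell_words := by
  intro stickers target _
  unfold Spec_stickers_to_spell_words
  simp only [stickers_to_spell_words, stickers_to_spell_words_alt]
  set tl := target.toList with htl
  set sts := stickers.map String.toList with hsts
  set chars := PySem.List.sorted (PySem.Set.ofList tl) (fun x => x) false with hchars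
  set count := PySem.Dict.counter tl with hcount
  set need0 := chars.foldl (fun m c => m.insert c ((tl.count c : Int))) PySem.Dict.empty
    with hneed0
  have hmemchars : ∀ x : Char, x ∈ chars ↔ x ∈ tl := by
    intro x
    rw [hchars, PySem.List.mem_sorted, PySem.Set.mem_ofList]
  have hA : pvDfsA sts count tl 0 PySem.Dict.empty none = pvGA sts count tl PySem.Dict.empty := by
    rw [pvDfsA_eq sts count tl 0 PySem.Dict.empty none (by intro r h; cases h)]
    rcases pvGA sts count tl PySem.Dict.empty with _ | v <;> simp [pvOmin]
  have hcorr : pvCorr count PySem.Dict.empty need0 := by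
    intro x
    rw [hneed0, pvNeed0_getD, PySem.Dict.getD_empty, hcount, PySem.Dict.getD_counter]
    by_cases hm : x ∈ chars
    · rw [if_pos hm]
      have : (0 : Int) ≤ (tl.count x : Int) := Int.natCast_nonneg _
      omega
    · rw [if_neg hm]
      have hz : tl.count x = 0 := List.count_eq_zero.mpr (fun hmem => hm ((hmemchars x).mpr hmem))
      rw [hz]
      simp
  have hgood : pvGoodN chars need0 := by
    intro x hx
    rw [hneed0, pvNeed0_getD, if_neg hx, PySem.Dict.getD_empty]
  have hcempty : pvCacheOK sts chars tl PySem.Dict.empty := by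
    intro i vec v hget
    rw [PySem.Dict.get?_empty] at hget
    cases hget
  have hB := (pvBestB_ok sts chars tl tl 0 need0 PySem.Dict.empty le_rfl
    (by simp) hgood hcempty).1
  rw [hA, pvGA_eq_bestPure sts count tl PySem.Dict.empty need0 hcorr, hB]
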